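-- pv_equiv track=rewrite | github.com/fstark/apple1loader | makerom.py | find_identical_modulo_eight
-- ===== SOURCE A (Python) =====
-- def find_identical_modulo_eight(numbers):
--     seen_modulo = {}
--
--     for num in numbers:
--         modulo_eight = num % 8
--
--         if modulo_eight in seen_modulo:
--             return [seen_modulo[modulo_eight], num]
--
--         seen_modulo[modulo_eight] = num
--
--     return None
-- ===== SOURCE B (Python) =====
-- def find_identical_modulo_eight(numbers):
--     nums = list(numbers)
--     for i in range(len(nums)):
--         for j in range(i):
--             if nums[j] % 8 == nums[i] % 8:
--                 return [nums[j], nums[i]]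
--     return None
-- ===== Notes on version B (the rewrite author's own statement) =====
-- stated objective: alternative
-- what changed: Replaces the single-pass hash map of first-seen residues with a nested index loop that, for each element, scans all earlier elements for the first one with the same residue mod 8.
import Mathlib
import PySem

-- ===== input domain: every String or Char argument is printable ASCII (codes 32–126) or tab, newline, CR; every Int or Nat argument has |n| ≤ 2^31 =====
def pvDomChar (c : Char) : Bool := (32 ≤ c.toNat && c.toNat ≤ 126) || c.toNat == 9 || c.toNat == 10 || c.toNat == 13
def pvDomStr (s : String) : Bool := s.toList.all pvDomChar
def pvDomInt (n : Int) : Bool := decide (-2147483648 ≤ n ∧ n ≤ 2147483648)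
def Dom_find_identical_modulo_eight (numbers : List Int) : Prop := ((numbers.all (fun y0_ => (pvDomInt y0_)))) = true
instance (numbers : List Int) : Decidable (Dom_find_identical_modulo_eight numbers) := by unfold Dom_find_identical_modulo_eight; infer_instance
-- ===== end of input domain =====

-- B replaces A's hash map of first-seen residues by a nested loop scanning earlier elements (alternative decomposition, same return value).


-- ===== PORT A =====
-- the 'for num in numbers' loop carrying the dict seen_modulo
def pvGoA (seen_modulo : PySem.Dict Int Int) : List Int → Option (List Int)
  | [] => none
  | num :: rest =>
    let modulo_eight := PySem.Int.mod num 8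
    match seen_modulo.get? modulo_eight with
    | some v => some [v, num]
    | none => pvGoA (seen_modulo.insert modulo_eight num) rest

def find_identical_modulo_eight (numbers : List Int) : Option (List Int) :=
  pvGoA PySem.Dict.empty numbers

-- ===== PORT B =====
-- the inner loop 'for j in range(i)': scan the earlier elements (in order) for the first with the same residue
def pvInnerB (xi : Int) : List Int → Option (List Int)
  | [] => none
  | y :: rest =>
    if PySem.Int.mod y 8 = PySem.Int.mod xi 8 then some [y, xi] else pvInnerB xi rest

-- the outer loop 'for i in range(len(nums))': seen = nums[0:i] in order
def pvOuterB (seen : List Int) : List Int → Option (List Int)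
  | [] => none
  | n :: rest =>
    match pvInnerB n seen with
    | some r => some r
    | none => pvOuterB (seen ++ [n]) rest

def find_identical_modulo_eight_alt (numbers : List Int) : Option (List Int) :=
  pvOuterB [] numbers

-- ===== PRECONDITION & SPEC =====
def Spec_find_identical_modulo_eight (numbers : List Int) (out : Option (List Int)) : Prop := out = find_identical_modulo_eight_alt numbers
instance (numbers : List Int) (out : Option (List Int)) : Decidable (Spec_find_identical_modulo_eight numbers out) := by unfold Spec_find_identical_modulo_eight; infer_instance

-- ===== CLAIM (what is proved, stated in full; the proofs are below) =====
def Claim_equal_find_identical_modulo_eight : Prop := ∀ (numbers : List Int), Dom_find_identical_modulo_eight numbers → Spec_find_identical_modulo_eight numbers (find_identical_modulo_eight numbers)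

-- ===== LEMMAS AND PROOFS =====

-- B's inner scan is a find? over the earlier elements
theorem pvInnerB_eq_find? (xi : Int) (seen : List Int) :
    pvInnerB xi seen =
      (seen.find? (fun y => PySem.Int.mod y 8 == PySem.Int.mod xi 8)).map (fun y => [y, xi]) := by
  induction seen with
  | nil => rfl
  | cons y rest ih =>
    by_cases h : y % 8 = xi % 8
    · simp [pvInnerB, List.find?, h]
    · have hb : (y % 8 == xi % 8) = false := beq_eq_false_iff_ne.mpr h
      simp [pvInnerB, List.find?, h, hb, ih]

-- main invariant: the dict agrees with 'first earlier element of that residue'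
theorem pvGoA_eq_pvOuterB (rest : List Int) :
    ∀ (d : PySem.Dict Int Int) (seen : List Int),
      (∀ m : Int, d.get? m = seen.find? (fun y => PySem.Int.mod y 8 == m)) →
      pvGoA d rest = pvOuterB seen rest := by
  induction rest with
  | nil => intro d seen _; rfl
  | cons n rest ih =>
    intro d seen hinv
    have hd := hinv (PySem.Int.mod n 8)
    simp only [pvGoA, pvOuterB, pvInnerB_eq_find?]
    rw [hd]
    cases hfind : seen.find? (fun y => PySem.Int.mod y 8 == PySem.Int.mod n 8) with
    | some v => simp
    | none =>
      simp only [Option.map_none]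
      apply ih
      intro m
      rw [PySem.Dict.get?_insert]
      have hmod : ∀ a : Int, PySem.Int.mod a 8 = a % 8 := fun a =>
        PySem.Int.mod_eq_emod_of_pos (by norm_num)
      by_cases hm : m = PySem.Int.mod n 8
      · subst hm
        simp only [hmod] at hfind
        simp [List.find?_append, hfind, List.find?]
      · rw [if_neg hm, hinv m, List.find?_append]
        have hne : (n % 8 == m) = false := by
          simp only [beq_eq_false_iff_ne]
          intro h; exact hm (by rw [hmod]; exact h.symm)
        simp [List.find?, hne]

-- ===== VERDICT (by name: the statement is the Claim_ definition above) =====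
theorem find_identical_modulo_eight_spec : Claim_equal_find_identical_modulo_eight := by
  intro numbers _
  unfold Spec_find_identical_modulo_eight find_identical_modulo_eight find_identical_modulo_eight_alt
  exact pvGoA_eq_pvOuterB numbers PySem.Dict.empty [] (fun m => by simp [PySem.Dict.get?_empty])
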